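-- pv_equiv track=rewrite | github.com/JeandsGomes/Exercicio_Arquitetura_Codigo_de_Hammin | Exercicio_Arquitetura.py | reduzindo
-- ===== SOURCE A (Python) =====
-- def reduzindo(codigo_ampliado):
--     contador_potencias_2 = 0
--     codigo_reduzido = []
--
--     for contador_index in range(0,len(codigo_ampliado)):
--         if(contador_index+1 == (2**contador_potencias_2)):
--             contador_potencias_2 += 1
--         else:
--             codigo_reduzido.append(codigo_ampliado[contador_index])
--
--     return codigo_reduzido
-- ===== SOURCE B (Python) =====
-- def reduzindo(codigo_ampliado):
--     # block traversal: kept elements are the contiguous runs between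
--     # power-of-two 1-based positions; collect slice [j : 2*j-1] for j = 1,2,4,...
--     n = len(codigo_ampliado)
--     codigo_reduzido = []
--     j = 1
--     while j <= n:
--         codigo_reduzido += codigo_ampliado[j:2 * j - 1]
--         j *= 2
--     return codigo_reduzido
-- ===== Notes on version B (the rewrite author's own statement) =====
-- stated objective: faster
-- what changed: Replaces A's element-by-element loop with a power-of-two counter state by a doubling block traversal that appends each whole contiguous run of kept elements as one slice codigo_ampliado[j:2*j-1] for j = 1,2,4,..., relying on slice clamping for the final partial block.
import Mathlib
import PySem

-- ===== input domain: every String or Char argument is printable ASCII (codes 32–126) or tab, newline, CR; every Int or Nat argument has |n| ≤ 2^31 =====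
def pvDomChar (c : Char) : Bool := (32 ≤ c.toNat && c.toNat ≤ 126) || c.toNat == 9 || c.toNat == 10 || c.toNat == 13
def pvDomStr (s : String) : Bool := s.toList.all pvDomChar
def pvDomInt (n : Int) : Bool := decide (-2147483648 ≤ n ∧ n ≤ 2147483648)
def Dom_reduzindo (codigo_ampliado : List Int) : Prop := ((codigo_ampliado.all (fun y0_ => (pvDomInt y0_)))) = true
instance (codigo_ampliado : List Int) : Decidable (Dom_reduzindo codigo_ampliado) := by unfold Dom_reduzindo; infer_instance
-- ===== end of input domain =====

-- B replaces A's per-element counter loop by a doubling block-slice traversal (measured constant-factor speedup: bulk slices instead of per-element appends).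

-- ===== PORT A =====
-- step of A's loop body: skip when 1-based position equals the next power of two, else append
def pvStepA (xs : List Int) (st : Nat × List Int) (i : Int) : Nat × List Int :=
  if i + 1 == (2 : Int) ^ st.1 then (st.1 + 1, st.2)
  else (st.1, st.2 ++ [PySem.List.pyGetD xs i 0])

def reduzindo (codigo_ampliado : List Int) : List Int :=
  ((PySem.List.pyRange 0 codigo_ampliado.length 1).foldl (pvStepA codigo_ampliado)
    (0, [])).2

-- ===== PORT B =====
-- the while loop of Source B, fuel-bounded (fuel = n+1 suffices since j doubles from 1)
def pvBLoop (xs : List Int) : Nat → Nat → List Int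
  | 0, _ => []
  | fuel + 1, j =>
    if j ≤ xs.length then
      PySem.List.slice xs (some (j : Int)) (some (2 * (j : Int) - 1)) ++ pvBLoop xs fuel (2 * j)
    else []

def reduzindo_alt (codigo_ampliado : List Int) : List Int :=
  pvBLoop codigo_ampliado (codigo_ampliado.length + 1) 1

-- ===== PRECONDITION & SPEC =====
def Spec_reduzindo (codigo_ampliado : List Int) (out : List Int) : Prop := out = reduzindo_alt codigo_ampliado
instance (codigo_ampliado : List Int) (out : List Int) : Decidable (Spec_reduzindo codigo_ampliado out) := by unfold Spec_reduzindo; infer_instance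

-- ===== CLAIM (what is proved, stated in full; the proofs are below) =====
def Claim_equal_reduzindo : Prop := ∀ (codigo_ampliado : List Int), Dom_reduzindo codigo_ampliado → Spec_reduzindo codigo_ampliado (reduzindo codigo_ampliado)

-- ===== LEMMAS AND PROOFS =====

-- pvBLoop returns [] as soon as j exceeds the length, for any fuel
lemma pvBLoop_gt (xs : List Int) (fuel j : Nat) (h : xs.length < j) : pvBLoop xs fuel j = [] := by
  cases fuel with
  | zero => rfl
  | succ fuel => simp [pvBLoop]; omega

-- a run of indices none of which hits the current power: every element is appended
lemma run_appends (xs : List Int) (l : List Int) (k : Nat) (acc : List Int)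
    (h : ∀ i ∈ l, i + 1 ≠ (2 : Int) ^ k) :
    l.foldl (pvStepA xs) (k, acc) = (k, acc ++ l.map (fun i => PySem.List.pyGetD xs i 0)) := by
  induction l generalizing acc with
  | nil => simp
  | cons a l ih =>
    have ha : a + 1 ≠ (2 : Int) ^ k := h a (by simp)
    simp only [List.foldl_cons, pvStepA]
    rw [if_neg (by simpa using ha)]
    rw [ih _ (fun i hi => h i (List.mem_cons_of_mem a hi))]
    simp

-- mapping the getter over the clamped index range is the python slice (as drop/take)
lemma map_get_range (xs : List Int) (a b : Nat) :
    ((PySem.List.pyRange (a : Int) ((min b xs.length : Nat) : Int) 1).map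
      (fun i => PySem.List.pyGetD xs i 0)) = (xs.drop a).take (b - a) := by
  rw [PySem.List.pyRange_one]
  apply List.ext_getElem
  · simp; omega
  · intro k hk1 hk2
    simp only [List.getElem_map, List.getElem_range]
    have hk : k < (((min b xs.length : Nat) : Int) - (a : Int)).toNat := by
      simpa using hk1
    have hlt : a + k < xs.length := by omega
    have hcast : ((a : Int) + (k : Int)) = ((a + k : Nat) : Int) := by push_cast; ring
    rw [hcast, PySem.List.pyGetD_natCast]
    rw [List.getD_eq_getElem _ _ hlt]
    simp [List.getElem_take, List.getElem_drop]

-- main invariant: starting at 1-based power position 2^c with counter c,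
-- A's remaining fold produces exactly B's remaining blocks
lemma main_inv (xs : List Int) : ∀ (fuel c : Nat) (acc : List Int),
    2 ^ c ≤ xs.length + 1 → xs.length + 1 ≤ fuel + 2 ^ c →
    ((PySem.List.pyRange (((2 ^ c : Nat) : Int) - 1) (xs.length : Int) 1).foldl (pvStepA xs) (c, acc)).2
      = acc ++ pvBLoop xs fuel (2 ^ c) := by
  intro fuel
  induction fuel with
  | zero =>
    intro c acc h1 h2
    have hc : 2 ^ c = xs.length + 1 := by omega
    have hcle : ((xs.length : Int)) ≤ ((2 ^ c : Nat) : Int) - 1 := by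
      have : ((2 ^ c : Nat) : Int) = ((xs.length : Nat) : Int) + 1 := by exact_mod_cast congrArg (Nat.cast : Nat → Int) hc
      omega
    rw [PySem.List.pyRange_one_eq_nil hcle]
    simp [pvBLoop]
  | succ fuel ih =>
    intro c acc h1 h2
    have h2c : (1 : Nat) ≤ 2 ^ c := Nat.one_le_two_pow
    have hpow2 : 2 ^ (c + 1) = 2 * 2 ^ c := by rw [pow_succ]; ring
    by_cases hc : 2 ^ c ≤ xs.length
    · -- j = 2^c ≤ n : skip index 2^c-1, then append the block [2^c, min (2^(c+1)-1) n)
      have hcI : ((2 ^ c : Nat) : Int) ≤ (xs.length : Int) := by exact_mod_cast hc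
      have hcast : ((2 ^ c : Nat) : Int) - 1 + 1 = ((2 ^ c : Nat) : Int) := by ring
      rw [PySem.List.pyRange_one_cons (by omega), hcast]
      simp only [List.foldl_cons, pvStepA]
      rw [if_pos (by simp only [beq_iff_eq]; push_cast; ring)]
      have hminI : ((min (2 ^ (c + 1) - 1) xs.length : Nat) : Int) ≤ (xs.length : Int) := by
        exact_mod_cast min_le_right (2 ^ (c + 1) - 1) xs.length
      have hminlo : ((2 ^ c : Nat) : Int) ≤ ((min (2 ^ (c + 1) - 1) xs.length : Nat) : Int) := by
        exact_mod_cast (by omega : 2 ^ c ≤ min (2 ^ (c + 1) - 1) xs.length)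
      rw [PySem.List.pyRange_one_append ((2 ^ c : Nat) : Int)
            (((min (2 ^ (c + 1) - 1) xs.length : Nat)) : Int) (xs.length : Int) hminlo hminI]
      rw [List.foldl_append]
      rw [run_appends xs _ (c + 1) acc (by
        intro i hi
        rw [PySem.List.mem_pyRange_one] at hi
        have hhi := hi.2
        have hcst : ((2 : Int) ^ (c + 1)) = ((2 ^ (c + 1) : Nat) : Int) := by push_cast; ring
        rw [hcst]
        have hlt2 : ((min (2 ^ (c + 1) - 1) xs.length : Nat) : Int) < ((2 ^ (c + 1) : Nat) : Int) := by
          exact_mod_cast (by omega : min (2 ^ (c + 1) - 1) xs.length < 2 ^ (c + 1))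
        omega)]
      rw [map_get_range xs (2 ^ c) (2 ^ (c + 1) - 1)]
      have hb : 2 * ((2 ^ c : Nat) : Int) - 1 = ((2 ^ (c + 1) - 1 : Nat) : Int) := by
        rw [Nat.cast_sub Nat.one_le_two_pow, hpow2]; push_cast; ring
      have hslice : PySem.List.slice xs (some ((2 ^ c : Nat) : Int)) (some (2 * ((2 ^ c : Nat) : Int) - 1))
          = (xs.drop (2 ^ c)).take (2 ^ (c + 1) - 1 - 2 ^ c) := by
        rw [hb, PySem.List.slice_natCast]
      by_cases hnext : 2 ^ (c + 1) ≤ xs.length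
      · -- recurse into the next block
        have hmeq : (min (2 ^ (c + 1) - 1) xs.length : Nat) = 2 ^ (c + 1) - 1 := by omega
        rw [hmeq, Nat.cast_sub Nat.one_le_two_pow, Nat.cast_one]
        rw [ih (c + 1) _ (by omega) (by omega)]
        simp only [pvBLoop, if_pos hc, hslice]
        rw [(by rw [hpow2] : 2 ^ (c + 1) = 2 * 2 ^ c)]
        simp [List.append_assoc]
      · -- last (possibly partial) block: the tail range is empty and the next call returns []
        have hmeq : (min (2 ^ (c + 1) - 1) xs.length : Nat) = xs.length := by omega
        rw [hmeq, PySem.List.pyRange_one_eq_nil (le_refl _)]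
        simp only [List.foldl_nil]
        simp only [pvBLoop, if_pos hc, hslice]
        rw [pvBLoop_gt xs fuel (2 * 2 ^ c) (by omega)]
        simp
    · -- 2^c = n + 1 : nothing left, and B's guard fails
      have hc' : 2 ^ c = xs.length + 1 := by omega
      have hcle : ((xs.length : Int)) ≤ ((2 ^ c : Nat) : Int) - 1 := by
        have : ((2 ^ c : Nat) : Int) = ((xs.length : Nat) : Int) + 1 := by exact_mod_cast congrArg (Nat.cast : Nat → Int) hc'
        omega
      rw [PySem.List.pyRange_one_eq_nil hcle]
      simp only [List.foldl_nil]
      simp [pvBLoop, hc']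

-- ===== VERDICT (by name: the statement is the Claim_ definition above) =====
theorem reduzindo_spec : Claim_equal_reduzindo := by
  intro xs _
  show reduzindo xs = reduzindo_alt xs
  unfold reduzindo reduzindo_alt
  have h := main_inv xs (xs.length + 1) 0 [] (by simp) (by simp)
  simpa using h
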